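-- pv_equiv track=rewrite | github.com/sora-kisaragi/keiba-database | src/main.py | combine_values
-- ===== SOURCE A (Python) =====
-- def combine_values(d):
--     keys_to_remove = []
--     for key in d:
--         if isinstance(key, str) and any(c.isalpha() for c in key):
--             digit_key = ''.join(filter(str.isdigit, key))
--             if digit_key in d:
--                 d[digit_key] += d[key]
--             keys_to_remove.append(key)
--     for key in keys_to_remove:
--         del d[key]
--     return d
-- ===== SOURCE B (Python) =====
-- def combine_values(d):
--     # Build a grouping table (digit_key -> concatenated values) in one pass,
--     # then delete the alpha keys, then apply the table to the surviving dict.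
--     merges = {}
--     removed = []
--     for key, val in d.items():
--         if isinstance(key, str) and any(c.isalpha() for c in key):
--             digit_key = ''.join(c for c in key if c.isdigit())
--             m = merges.get(digit_key)
--             if m is None:
--                 merges[digit_key] = list(val)
--             else:
--                 m.extend(val)
--             removed.append(key)
--     for key in removed:
--         del d[key]
--     for digit_key, v in merges.items():
--         if digit_key in d:
--             d[digit_key] += v
--     return d
-- ===== Notes on version B (the rewrite author's own statement) =====
-- stated objective: alternative
-- what changed: Instead of merging each alpha key's value into its digit key inline while scanning the dict, B builds a grouping table (digit_key -> concatenated values) and a removal list in one pass, deletes the removed keys, and then applies the table to the surviving dict in a separate pass.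
import Mathlib
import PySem

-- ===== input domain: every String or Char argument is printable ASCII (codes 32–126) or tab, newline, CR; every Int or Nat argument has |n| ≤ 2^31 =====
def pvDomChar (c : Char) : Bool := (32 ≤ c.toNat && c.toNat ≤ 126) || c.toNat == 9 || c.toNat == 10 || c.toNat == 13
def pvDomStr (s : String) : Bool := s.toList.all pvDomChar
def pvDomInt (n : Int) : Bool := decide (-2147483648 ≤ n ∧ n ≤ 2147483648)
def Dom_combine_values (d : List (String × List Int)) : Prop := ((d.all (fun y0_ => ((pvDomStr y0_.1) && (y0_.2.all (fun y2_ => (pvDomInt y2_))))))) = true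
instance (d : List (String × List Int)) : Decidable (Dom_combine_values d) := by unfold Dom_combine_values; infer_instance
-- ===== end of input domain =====

-- B builds a grouping table first and applies it after the deletions, instead of merging
-- inline while scanning (objective: alternative decomposition, same cost). A mutates its
-- argument in place and returns it; the Lean equivalence is about the returned value.

-- ===== PORT A =====
-- for key in d: if any alpha: digit_key = digits(key); if digit_key in d: d[digit_key] += d[key]; keys_to_remove.append(key)
-- then: for key in keys_to_remove: del d[key]; return d
-- (isinstance(key, str) is always true at type String and is dropped)
def combine_values (d : List (String × List Int)) : List (String × List Int) :=
  let d0 : PySem.Dict String (List Int) := ⟨d⟩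
  let st :=
    (PySem.Dict.keys d0).foldl
      (fun (st : PySem.Dict String (List Int) × List String) key =>
        if key.toList.any PySem.Chars.isalpha then
          let digit_key := String.ofList (key.toList.filter PySem.Chars.isdigit)
          ((if st.1.contains digit_key then
              st.1.modify digit_key [] (· ++ st.1.getD key []) else st.1),
           st.2 ++ [key])
        else st)
      (d0, [])
  (st.2.foldl (fun dd k => dd.erase k) st.1).items

-- ===== PORT B =====
-- pass 1 over d.items(): m = merges.get(digit_key); if m is None: merges[digit_key] = list(val)
-- else: m.extend(val); removed.append(key).  pass 2: delete removed keys;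
-- pass 3: for (digit_key, v) in merges: if digit_key in d: d[digit_key] += v
def combine_values_alt (d : List (String × List Int)) : List (String × List Int) :=
  let st :=
    d.foldl
      (fun (st : PySem.Dict String (List Int) × List String) kv =>
        if kv.1.toList.any PySem.Chars.isalpha then
          let digit_key := String.ofList (kv.1.toList.filter PySem.Chars.isdigit)
          ((match st.1.get? digit_key with
            | none => st.1.insert digit_key kv.2
            | some m => st.1.insert digit_key (m ++ kv.2)), st.2 ++ [kv.1])
        else st)
      (PySem.Dict.empty, [])
  let d1 := st.2.foldl (fun dd k => dd.erase k) (⟨d⟩ : PySem.Dict String (List Int))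
  (st.1.items.foldl
      (fun (dd : PySem.Dict String (List Int)) p =>
        if dd.contains p.1 then dd.modify p.1 [] (· ++ p.2) else dd)
      d1).items

-- ===== PRECONDITION & SPEC =====
-- Pre_ excludes association lists with duplicate keys: they do not represent a Python
-- dict (which cannot hold two equal keys), so A is never run on them.
def Pre_combine_values (d : List (String × List Int)) : Prop := (d.map Prod.fst).Nodup
instance (d : List (String × List Int)) : Decidable (Pre_combine_values d) := by
  unfold Pre_combine_values; infer_instance
def pvWitness_combine_values : (List (String × List Int)) := [("a1", [1]), ("1", [2])]
def Spec_combine_values (d : List (String × List Int)) (out : List (String × List Int)) : Prop := out = combine_values_alt d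
instance (d : List (String × List Int)) (out : List (String × List Int)) : Decidable (Spec_combine_values d out) := by unfold Spec_combine_values; infer_instance

-- ===== CLAIM (what is proved, stated in full; the proofs are below) =====
def Claim_equal_combine_values : Prop := ∀ (d : List (String × List Int)), Dom_combine_values d → Pre_combine_values d → Spec_combine_values d (combine_values d)

-- ===== LEMMAS AND PROOFS =====

def alphaK (k : String) : Bool := k.toList.any PySem.Chars.isalpha
def dkey (k : String) : String := String.ofList (k.toList.filter PySem.Chars.isdigit)
def stepMod (D : PySem.Dict String (List Int)) (p : String × List Int) : PySem.Dict String (List Int) :=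
  D.modify p.1 [] (· ++ p.2)
def stepGuard (D : PySem.Dict String (List Int)) (p : String × List Int) : PySem.Dict String (List Int) :=
  if D.contains p.1 then D.modify p.1 [] (· ++ p.2) else D
def contribOf (L : List (String × List Int)) (c : String) : List Int :=
  ((L.filter (fun p => p.1 == c)).map (·.2)).flatten

theorem toList_ofList (l : List Char) : (String.ofList l).toList = l :=
  Eq.symm (String.ofList_eq.mp rfl)

theorem isalpha_eq_false_of_isdigit (c : Char) (h : PySem.Chars.isdigit c = true) :
    PySem.Chars.isalpha c = false := by
  have h9 : '9'.val.toNat = 57 := rfl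
  have h0 : '0'.val.toNat = 48 := rfl
  have hA : 'A'.val.toNat = 65 := rfl
  have hZ : 'Z'.val.toNat = 90 := rfl
  have ha : 'a'.val.toNat = 97 := rfl
  have hz : 'z'.val.toNat = 122 := rfl
  simp only [PySem.Chars.isdigit, PySem.Chars.isalpha, PySem.Chars.isupper, PySem.Chars.islower,
    Bool.and_eq_true, decide_eq_true_eq, Bool.or_eq_false_iff, Bool.and_eq_false_iff,
    Char.le_def, UInt32.le_iff_toNat_le, decide_eq_false_iff_not, not_le,
    h9, h0, hA, hZ, ha, hz] at h ⊢
  omega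

theorem alphaK_dkey (k : String) : alphaK (dkey k) = false := by
  simp only [alphaK, dkey, toList_ofList, List.any_eq_false]
  intro c hc
  simp only [List.mem_filter] at hc
  simp [isalpha_eq_false_of_isdigit c hc.2]

theorem pairSplit {α : Type} (l : List α) (p : α → Bool)
    (f : PySem.Dict String (List Int) → α → PySem.Dict String (List Int)) (h : α → String)
    (D : PySem.Dict String (List Int)) (acc : List String) :
    l.foldl (fun st x => if p x then (f st.1 x, st.2 ++ [h x]) else st) (D, acc)
      = ((l.filter p).foldl f D, acc ++ (l.filter p).map h) := by
  induction l generalizing D acc with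
  | nil => simp
  | cons x xs ih =>
    by_cases hx : p x
    · simp [hx, ih]
    · simp [hx, ih]

theorem getD_stepGuard_of_ne (D : PySem.Dict String (List Int)) (p : String × List Int)
    (k : String) (hk : k ≠ p.1) : (stepGuard D p).getD k [] = D.getD k [] := by
  unfold stepGuard
  split
  · rw [PySem.Dict.getD_modify, if_neg hk]
  · rfl

theorem freezeVals (ks : List String) (hks : ∀ k ∈ ks, alphaK k = true)
    (D : PySem.Dict String (List Int)) :
    ks.foldl (fun D k => stepGuard D (dkey k, D.getD k [])) D
      = (ks.map (fun k => (dkey k, D.getD k []))).foldl stepGuard D := by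
  induction ks generalizing D with
  | nil => rfl
  | cons k ks ih =>
    have hk : alphaK k = true := hks k (by simp)
    simp only [List.foldl_cons, List.map_cons]
    rw [ih (fun k' h' => hks k' (by simp [h']))]
    congr 1
    apply List.map_congr_left
    intro k' hk'
    have hne : k' ≠ dkey k := by
      intro hEq
      have := alphaK_dkey k
      rw [← hEq, hks k' (by simp [hk'])] at this
      simp at this
    rw [getD_stepGuard_of_ne D (dkey k, D.getD k []) k' hne]

theorem items_foldl_stepGuard (L : List (String × List Int)) (D : PySem.Dict String (List Int))
    (h : D.keys.Nodup) :
    (L.foldl stepGuard D).items = D.items.map (fun q => (q.1, q.2 ++ contribOf L q.1)) := by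
  induction L generalizing D with
  | nil => simp [contribOf]
  | cons p L ih =>
    by_cases hc : D.contains p.1
    · have hstep : stepGuard D p = D.insert p.1 (D.getD p.1 [] ++ p.2) := by
        simp [stepGuard, hc, PySem.Dict.modify]
      have hkeys : (D.insert p.1 (D.getD p.1 [] ++ p.2)).keys = D.keys :=
        PySem.Dict.keys_insert_of_contains _ _ hc
      rw [List.foldl_cons, hstep, ih _ (by rw [hkeys]; exact h),
        PySem.Dict.items_insert_of_contains _ _ hc, List.map_map]
      apply List.map_congr_left
      intro q hq
      by_cases hq1 : q.1 = p.1
      · have hmem : (q.1, q.2) ∈ D.items := by simpa using hq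
        have hval : D.getD p.1 [] = q.2 := by
          rw [← hq1]; exact PySem.Dict.getD_of_mem_items D hmem h []
        have hb : (q.1 == p.1) = true := beq_iff_eq.mpr hq1
        have hb' : (p.1 == q.1) = true := beq_iff_eq.mpr hq1.symm
        simp only [Function.comp_apply, hb, if_true, hval, contribOf, List.filter_cons, hb',
          List.map_cons, List.flatten_cons, Prod.mk.injEq]
        exact ⟨hq1.symm, by rw [hq1, List.append_assoc]⟩
      · have hb : (q.1 == p.1) = false := beq_eq_false_iff_ne.mpr hq1
        have hb' : (p.1 == q.1) = false := beq_eq_false_iff_ne.mpr (Ne.symm hq1)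
        simp [Function.comp_apply, hq1, contribOf, hb']
    · have hstep : stepGuard D p = D := by simp [stepGuard, hc]
      rw [List.foldl_cons, hstep, ih _ h]
      apply List.map_congr_left
      intro q hq
      have hqp : (q.1 == p.1) = false := by
        cases hb : (q.1 == p.1) with
        | false => rfl
        | true =>
          exfalso
          have hcontr : D.contains p.1 = true := by
            simp only [PySem.Dict.contains, List.any_eq_true]; exact ⟨q, hq, hb⟩
          simp [hcontr] at hc
      have hbeq' : (p.1 == q.1) = false :=
        beq_eq_false_iff_ne.mpr (Ne.symm (beq_eq_false_iff_ne.mp hqp))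
      simp [contribOf, List.filter_cons, hbeq']

theorem items_foldl_erase (rem : List String) (D : PySem.Dict String (List Int)) :
    (rem.foldl (fun dd k => dd.erase k) D).items
      = D.items.filter (fun q => !(rem.contains q.1)) := by
  induction rem generalizing D with
  | nil => simp
  | cons k rem ih =>
    rw [List.foldl_cons, ih]
    show (D.items.filter _).filter _ = _
    rw [List.filter_filter]
    apply List.filter_congr
    intro q _
    simp only [List.contains_cons, Bool.not_or, Bool.and_comm]

theorem getD_foldl_stepMod (L : List (String × List Int)) (D : PySem.Dict String (List Int))
    (c : String) : (L.foldl stepMod D).getD c [] = D.getD c [] ++ contribOf L c := by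
  induction L generalizing D with
  | nil => simp [contribOf]
  | cons p L ih =>
    rw [List.foldl_cons, ih]
    unfold stepMod
    rw [PySem.Dict.getD_modify]
    by_cases hcp : c = p.1
    · have hb : (p.1 == c) = true := beq_iff_eq.mpr hcp.symm
      simp [hcp, contribOf, List.filter_cons, hb, List.append_assoc]
    · have hb : (p.1 == c) = false := beq_eq_false_iff_ne.mpr (Ne.symm hcp)
      simp [hcp, contribOf, List.filter_cons, hb]

theorem filter_key_of_nodup (l : List (String × List Int)) (h : (l.map Prod.fst).Nodup)
    (c : String) :
    l.filter (fun p => p.1 == c) = (l.find? (fun p => p.1 == c)).toList := by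
  induction l with
  | nil => simp
  | cons p l ih =>
    rw [List.map_cons, List.nodup_cons] at h
    by_cases hb : (p.1 == c) = true
    · rw [List.filter_cons_of_pos (p := fun q : String × List Int => q.1 == c) hb,
        List.find?_cons_of_pos (p := fun q : String × List Int => q.1 == c) hb]
      have : l.filter (fun p => p.1 == c) = [] := by
        rw [List.filter_eq_nil_iff]
        intro q hq hqc
        exact h.1 (by
          have : q.1 = p.1 := (beq_iff_eq.mp hqc).trans (beq_iff_eq.mp hb).symm
          rw [← this]; exact List.mem_map_of_mem hq)
      simp [this]
    · rw [List.filter_cons_of_neg (p := fun q : String × List Int => q.1 == c) hb,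
        List.find?_cons_of_neg (p := fun q : String × List Int => q.1 == c) hb, ih h.2]

theorem contrib_merges (L : List (String × List Int)) (c : String) :
    contribOf (L.foldl stepMod PySem.Dict.empty).items c = contribOf L c := by
  have hnd : (L.foldl stepMod PySem.Dict.empty).keys.Nodup := by
    have := PySem.Dict.nodup_keys_foldl_modify_key L Prod.fst ([] : List Int)
      (fun _ x => (· ++ x.2)) PySem.Dict.empty (by simp [PySem.Dict.keys, PySem.Dict.empty])
    exact this
  have hgetD : (L.foldl stepMod PySem.Dict.empty).getD c [] = contribOf L c := by
    rw [getD_foldl_stepMod]; simp [PySem.Dict.getD_empty]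
  rw [contribOf, filter_key_of_nodup _ hnd c]
  cases hf : (L.foldl stepMod PySem.Dict.empty).items.find? (fun p => p.1 == c) with
  | none =>
    have hget : (L.foldl stepMod PySem.Dict.empty).get? c = none := by
      simp [PySem.Dict.get?, hf]
    have hnk : c ∉ (L.foldl stepMod PySem.Dict.empty).keys :=
      (PySem.Dict.get?_eq_none_iff_not_mem_keys _ _).mp hget
    have hLf : L.filter (fun p => p.1 == c) = [] := by
      rw [List.filter_eq_nil_iff]
      intro q hq hqc
      apply hnk
      have hkeys : (L.foldl stepMod PySem.Dict.empty).keys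
          = PySem.Set.update PySem.Dict.empty.keys (L.map Prod.fst) :=
        PySem.Dict.keys_foldl_modify_key L Prod.fst ([] : List Int) (fun _ x => (· ++ x.2))
          PySem.Dict.empty
      rw [hkeys]
      have hcL : c ∈ L.map Prod.fst := by
        rw [← beq_iff_eq.mp hqc]; exact List.mem_map_of_mem hq
      exact (PySem.Set.mem_update _ _ _).mpr (Or.inr hcL)
    simp [contribOf, hLf]
  | some q =>
    have hget : (L.foldl stepMod PySem.Dict.empty).get? c = some q.2 := by
      simp [PySem.Dict.get?, hf]
    have : (L.foldl stepMod PySem.Dict.empty).getD c [] = q.2 :=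
      PySem.Dict.getD_of_get?_eq_some _ [] hget
    simp [← hgetD, this]

theorem contains_rem (d : List (String × List Int)) (q : String × List Int) (hq : q ∈ d) :
    (((d.map Prod.fst).filter alphaK).contains q.1) = alphaK q.1 := by
  cases ha : alphaK q.1 with
  | true =>
    have hmem : q.1 ∈ (d.map Prod.fst).filter alphaK :=
      List.mem_filter.mpr ⟨List.mem_map_of_mem hq, ha⟩
    simpa using hmem
  | false =>
    have hnmem : q.1 ∉ (d.map Prod.fst).filter alphaK := by
      intro hmem
      have := (List.mem_filter.mp hmem).2
      rw [ha] at this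
      exact Bool.false_ne_true this
    simpa using hnmem

theorem rem_eq (d : List (String × List Int)) :
    (d.map Prod.fst).filter alphaK = (d.filter (fun p => alphaK p.1)).map Prod.fst := by
  rw [List.filter_map]; rfl

theorem portA_char (d : List (String × List Int)) (hpre : (d.map Prod.fst).Nodup) :
    combine_values d
      = (d.filter (fun q => !alphaK q.1)).map
          (fun q => (q.1, q.2 ++
            contribOf ((d.filter (fun p => alphaK p.1)).map (fun p => (dkey p.1, p.2))) q.1)) := by
  have hsplit := pairSplit (PySem.Dict.keys (⟨d⟩ : PySem.Dict String (List Int))) alphaK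
    (fun D key => stepGuard D (dkey key, D.getD key [])) (fun key => key)
    (⟨d⟩ : PySem.Dict String (List Int)) []
  have h0 := congrArg
    (fun st : PySem.Dict String (List Int) × List String =>
      (st.2.foldl (fun dd k => dd.erase k) st.1).items) hsplit
  have hA0 : combine_values d
      = (((((PySem.Dict.keys (⟨d⟩ : PySem.Dict String (List Int))).filter alphaK).map
            (fun key => key)).foldl (fun dd k => dd.erase k)
          (((PySem.Dict.keys (⟨d⟩ : PySem.Dict String (List Int))).filter alphaK).foldl
            (fun D key => stepGuard D (dkey key, D.getD key [])) ⟨d⟩))).items := by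
    refine Eq.trans ?_ (by simpa using h0)
    rfl
  have hkeys : PySem.Dict.keys (⟨d⟩ : PySem.Dict String (List Int)) = d.map Prod.fst := rfl
  have hall : ∀ k ∈ (d.map Prod.fst).filter alphaK, alphaK k = true := by
    intro k hk; exact (List.mem_filter.mp hk).2
  rw [hA0, hkeys, List.map_id', freezeVals _ hall]
  have hLmap : ((d.map Prod.fst).filter alphaK).map
        (fun k => (dkey k, (⟨d⟩ : PySem.Dict String (List Int)).getD k []))
      = (d.filter (fun p => alphaK p.1)).map (fun p => (dkey p.1, p.2)) := by
    rw [rem_eq, List.map_map]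
    apply List.map_congr_left
    intro p hp
    have hpd : p ∈ d := (List.mem_filter.mp hp).1
    have hmem : (p.1, p.2) ∈ (⟨d⟩ : PySem.Dict String (List Int)).items := by simpa using hpd
    simp [Function.comp_apply, PySem.Dict.getD_of_mem_items _ hmem hpre []]
  rw [hLmap, items_foldl_erase, items_foldl_stepGuard _ _ hpre]
  have hitems : (⟨d⟩ : PySem.Dict String (List Int)).items = d := rfl
  rw [hitems, List.filter_map]
  apply congrArg (List.map _)
  apply List.filter_congr
  intro q hq
  rw [show ((fun q : String × List Int => !((d.map Prod.fst).filter alphaK).contains q.1) ∘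
      (fun q : String × List Int => (q.1, q.2 ++ contribOf _ q.1))) q
    = !((d.map Prod.fst).filter alphaK).contains q.1 from rfl]
  rw [contains_rem d q hq]

theorem portB_char (d : List (String × List Int)) (hpre : (d.map Prod.fst).Nodup) :
    combine_values_alt d
      = (d.filter (fun q => !alphaK q.1)).map
          (fun q => (q.1, q.2 ++
            contribOf ((d.filter (fun p => alphaK p.1)).map (fun p => (dkey p.1, p.2))) q.1)) := by
  have hsplit := pairSplit d (fun kv : String × List Int => alphaK kv.1)
    (fun D kv =>
      match D.get? (dkey kv.1) with
      | none => D.insert (dkey kv.1) kv.2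
      | some m => D.insert (dkey kv.1) (m ++ kv.2)) (fun kv => kv.1)
    PySem.Dict.empty []
  have hfun : (fun (D : PySem.Dict String (List Int)) (kv : String × List Int) =>
      match D.get? (dkey kv.1) with
      | none => D.insert (dkey kv.1) kv.2
      | some m => D.insert (dkey kv.1) (m ++ kv.2))
      = fun D kv => stepMod D (dkey kv.1, kv.2) := by
    funext D kv
    cases hg : D.get? (dkey kv.1) with
    | none =>
      simp only [stepMod, PySem.Dict.modify, PySem.Dict.getD_of_get?_eq_none D [] hg,
        List.nil_append]
    | some m =>
      simp only [stepMod, PySem.Dict.modify, PySem.Dict.getD_of_get?_eq_some D [] hg]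
  rw [hfun] at hsplit
  have h0 := congrArg
    (fun st : PySem.Dict String (List Int) × List String =>
      ((st.1.items).foldl stepGuard
        (st.2.foldl (fun dd k => dd.erase k) (⟨d⟩ : PySem.Dict String (List Int)))).items) hsplit
  have hB0 : combine_values_alt d
      = ((((d.filter (fun kv => alphaK kv.1)).foldl
              (fun D kv => stepMod D (dkey kv.1, kv.2)) PySem.Dict.empty).items).foldl stepGuard
          (((d.filter (fun kv => alphaK kv.1)).map (fun kv => kv.1)).foldl
            (fun dd k => dd.erase k) (⟨d⟩ : PySem.Dict String (List Int)))).items := by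
    refine Eq.trans ?_ (by simpa using h0)
    rfl
  rw [hB0]
  have hmerge : (d.filter (fun kv => alphaK kv.1)).foldl
        (fun D kv => stepMod D (dkey kv.1, kv.2)) PySem.Dict.empty
      = ((d.filter (fun p => alphaK p.1)).map (fun p => (dkey p.1, p.2))).foldl stepMod
          PySem.Dict.empty := by
    rw [List.foldl_map]
  have hd1 : (((d.filter (fun kv => alphaK kv.1)).map (fun kv => kv.1)).foldl
        (fun dd k => dd.erase k) (⟨d⟩ : PySem.Dict String (List Int))).items
      = d.filter (fun q => !alphaK q.1) := by
    rw [items_foldl_erase]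
    have hitems : (⟨d⟩ : PySem.Dict String (List Int)).items = d := rfl
    rw [hitems]
    apply List.filter_congr
    intro q hq
    have : ((d.filter (fun kv : String × List Int => alphaK kv.1)).map (fun kv => kv.1))
        = (d.map Prod.fst).filter alphaK := (rem_eq d).symm
    rw [this, contains_rem d q hq]
  have hd1nodup : (((d.filter (fun kv => alphaK kv.1)).map (fun kv => kv.1)).foldl
        (fun dd k => dd.erase k) (⟨d⟩ : PySem.Dict String (List Int))).keys.Nodup := by
    show ((((d.filter (fun kv => alphaK kv.1)).map (fun kv => kv.1)).foldl
        (fun dd k => dd.erase k) (⟨d⟩ : PySem.Dict String (List Int))).items.map (·.1)).Nodup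
    rw [hd1]
    exact List.Nodup.sublist (List.Sublist.map _ List.filter_sublist) hpre
  rw [hmerge, items_foldl_stepGuard _ _ hd1nodup, hd1]
  apply List.map_congr_left
  intro q _
  rw [contrib_merges]

-- ===== VERDICT (by name: the statement is the Claim_ definition above) =====
theorem combine_values_spec : Claim_equal_combine_values := by
  intro d _hdom hpre
  unfold Spec_combine_values Pre_combine_values at *
  rw [portA_char d hpre, portB_char d hpre]
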